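-- pv_equiv track=rewrite | github.com/firepd/MassNE | code/our.py | get_shift_index
-- ===== SOURCE A (Python) =====
-- def get_shift_index(n_unit, max_unit_size):
--     idx1 = []
--     idx2 = []
--     for i in range(n_unit):
--         for j in range(max_unit_size):
--             if j == max_unit_size - 1:
--                 continue
--             prev = i*max_unit_size + j
--             later = i*max_unit_size + j + 1
--             idx1.append(prev)
--             idx2.append(later)
--     return idx1, idx2
-- ===== SOURCE B (Python) =====
-- def get_shift_index(n_unit, max_unit_size):
--     idx1 = [x for x in range(n_unit * max_unit_size) if (x + 1) % max_unit_size != 0]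
--     idx2 = [x + 1 for x in idx1]
--     return idx1, idx2
-- ===== Notes on version B (the rewrite author's own statement) =====
-- stated objective: simpler
-- what changed: Replaces the nested unit-by-unit loops with a guarded skip by a single comprehension over the flat index range 0..n_unit*max_unit_size that keeps exactly the indices not ending a block ((x+1) % max_unit_size != 0), and derives idx2 as idx1 shifted by one.
-- outside the precondition, e.g. on get_shift_index(-1, -2): A returns ([], []), B returns ([0], [1])
import Mathlib
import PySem

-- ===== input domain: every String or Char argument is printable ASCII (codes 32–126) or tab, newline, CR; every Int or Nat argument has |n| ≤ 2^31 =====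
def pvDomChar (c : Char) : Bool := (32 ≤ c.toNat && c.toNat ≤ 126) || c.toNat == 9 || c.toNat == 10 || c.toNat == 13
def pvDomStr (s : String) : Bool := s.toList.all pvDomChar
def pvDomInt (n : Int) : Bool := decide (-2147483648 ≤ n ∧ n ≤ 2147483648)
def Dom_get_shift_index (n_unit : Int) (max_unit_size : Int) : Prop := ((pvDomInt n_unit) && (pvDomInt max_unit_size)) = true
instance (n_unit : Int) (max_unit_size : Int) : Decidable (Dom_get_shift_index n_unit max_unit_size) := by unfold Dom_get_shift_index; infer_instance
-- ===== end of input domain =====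

-- B replaces the nested per-unit loops (with a skip of each block's last slot) by one
-- filter over the flat range 0..n_unit*max_unit_size using a modular test; objective: simpler.


-- ===== PORT A =====
def get_shift_index (n_unit : Int) (max_unit_size : Int) : List Int × List Int :=
  (PySem.List.pyRange 0 n_unit 1).foldl (fun acc i =>
    (PySem.List.pyRange 0 max_unit_size 1).foldl (fun acc2 j =>
      if j = max_unit_size - 1 then acc2
      else (acc2.1 ++ [i * max_unit_size + j], acc2.2 ++ [i * max_unit_size + j + 1])) acc)
    ([], [])

-- ===== PORT B =====
def get_shift_index_alt (n_unit : Int) (max_unit_size : Int) : List Int × List Int :=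
  let idx1 := (PySem.List.pyRange 0 (n_unit * max_unit_size) 1).filter
    (fun x => decide (PySem.Int.mod (x + 1) max_unit_size ≠ 0))
  let idx2 := idx1.map (fun x => x + 1)
  (idx1, idx2)

-- ===== PRECONDITION & SPEC =====
-- Pre_ excludes only the inputs where BOTH counts are negative: there A's ranges are empty so
-- it returns ([], []) while B's flat range n_unit*max_unit_size > 0 is nonempty; negative counts
-- are outside the natural domain and either value is a defensible accident on this corner.
def Pre_get_shift_index (n_unit : Int) (max_unit_size : Int) : Prop :=
  0 ≤ n_unit ∨ 0 ≤ max_unit_size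
instance (n_unit : Int) (max_unit_size : Int) : Decidable (Pre_get_shift_index n_unit max_unit_size) := by
  unfold Pre_get_shift_index; infer_instance

def pvWitness_get_shift_index : Int × Int := (2, 3)

def Spec_get_shift_index (n_unit : Int) (max_unit_size : Int) (out : List Int × List Int) : Prop := out = get_shift_index_alt n_unit max_unit_size
instance (n_unit : Int) (max_unit_size : Int) (out : List Int × List Int) : Decidable (Spec_get_shift_index n_unit max_unit_size out) := by unfold Spec_get_shift_index; infer_instance

-- ===== CLAIM (what is proved, stated in full; the proofs are below) =====
def Claim_equal_get_shift_index : Prop := ∀ (n_unit : Int) (max_unit_size : Int), Dom_get_shift_index n_unit max_unit_size → Pre_get_shift_index n_unit max_unit_size → Spec_get_shift_index n_unit max_unit_size (get_shift_index n_unit max_unit_size)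

-- ===== LEMMAS AND PROOFS =====
theorem gsi_inner (m i : Int) :
    ∀ (k : Nat) (a : Int) (acc : List Int × List Int), (m - a).toNat = k →
      (PySem.List.pyRange a m 1).foldl (fun acc2 j =>
          if j = m - 1 then acc2
          else (acc2.1 ++ [i * m + j], acc2.2 ++ [i * m + j + 1])) acc
      = (acc.1 ++ PySem.List.pyRange (i * m + a) (i * m + m - 1) 1,
         acc.2 ++ (PySem.List.pyRange (i * m + a) (i * m + m - 1) 1).map (· + 1)) := by
  intro k
  induction k with
  | zero =>
    intro a acc hk
    have h1 : PySem.List.pyRange a m 1 = [] := PySem.List.pyRange_one_eq_nil (by omega)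
    have h2 : PySem.List.pyRange (i * m + a) (i * m + m - 1) 1 = [] :=
      PySem.List.pyRange_one_eq_nil (by omega)
    rw [h1, h2]; simp
  | succ k ih =>
    intro a acc hk
    have ha : a < m := by omega
    rw [PySem.List.pyRange_one_cons ha]
    simp only [List.foldl_cons]
    by_cases hlast : a = m - 1
    · subst hlast
      rw [if_pos rfl, ih (m - 1 + 1) acc (by omega)]
      have h2 : PySem.List.pyRange (i * m + (m - 1)) (i * m + m - 1) 1 = [] :=
        PySem.List.pyRange_one_eq_nil (by omega)
      have h3 : PySem.List.pyRange (i * m + (m - 1 + 1)) (i * m + m - 1) 1 = [] :=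
        PySem.List.pyRange_one_eq_nil (by omega)
      simp [h2]
    · rw [if_neg hlast, ih (a + 1) _ (by omega)]
      have h2 : PySem.List.pyRange (i * m + a) (i * m + m - 1) 1
          = (i * m + a) :: PySem.List.pyRange (i * m + a + 1) (i * m + m - 1) 1 :=
        PySem.List.pyRange_one_cons (by omega)
      rw [h2]
      simp only [List.map_cons, ← add_assoc, List.append_assoc, List.singleton_append]

theorem gsi_outer (n m : Int) :
    ∀ (k : Nat) (i0 : Int) (acc : List Int × List Int), (n - i0).toNat = k →
      (PySem.List.pyRange i0 n 1).foldl (fun acc i =>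
        (PySem.List.pyRange 0 m 1).foldl (fun acc2 j =>
          if j = m - 1 then acc2
          else (acc2.1 ++ [i * m + j], acc2.2 ++ [i * m + j + 1])) acc) acc
      = (acc.1 ++ (PySem.List.pyRange i0 n 1).flatMap
            (fun i => PySem.List.pyRange (i * m) (i * m + m - 1) 1),
         acc.2 ++ ((PySem.List.pyRange i0 n 1).flatMap
            (fun i => PySem.List.pyRange (i * m) (i * m + m - 1) 1)).map (· + 1)) := by
  intro k
  induction k with
  | zero =>
    intro i0 acc hk
    have h0 : PySem.List.pyRange i0 n 1 = [] := PySem.List.pyRange_one_eq_nil (by omega)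
    rw [h0]; simp
  | succ k ih =>
    intro i0 acc hk
    have hi : i0 < n := by omega
    rw [PySem.List.pyRange_one_cons hi]
    simp only [List.foldl_cons, List.flatMap_cons]
    rw [gsi_inner m i0 (m - 0).toNat 0 acc rfl, ih (i0 + 1) _ (by omega)]
    simp [List.append_assoc]

theorem gsi_block (m i : Int) (hm : 0 < m) :
    (PySem.List.pyRange (i * m) (i * m + m) 1).filter
        (fun x => decide (PySem.Int.mod (x + 1) m ≠ 0))
      = PySem.List.pyRange (i * m) (i * m + m - 1) 1 := by
  have hsplit : PySem.List.pyRange (i * m) (i * m + m) 1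
      = PySem.List.pyRange (i * m) (i * m + m - 1) 1 ++ [i * m + m - 1] := by
    have := PySem.List.pyRange_one_succ_right (a := i * m) (b := i * m + m - 1) (by omega)
    rw [show i * m + m - 1 + 1 = i * m + m by ring] at this
    exact this
  rw [hsplit, List.filter_append]
  have h1 : (PySem.List.pyRange (i * m) (i * m + m - 1) 1).filter
      (fun x => decide (PySem.Int.mod (x + 1) m ≠ 0))
      = PySem.List.pyRange (i * m) (i * m + m - 1) 1 := by
    apply List.filter_eq_self.mpr
    intro x hx
    rw [PySem.List.mem_pyRange_one] at hx
    simp only [decide_eq_true_eq]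
    intro hmod
    rw [PySem.Int.mod_eq_zero_iff_dvd] at hmod
    obtain ⟨c, hc⟩ := hmod
    have h1 : i * m < m * c := by omega
    have h2 : m * c < m * (i + 1) := by
      have hexp : m * (i + 1) = i * m + m := by ring
      omega
    rw [mul_comm i m] at h1
    have hic : i < c := lt_of_mul_lt_mul_left h1 (le_of_lt hm)
    have hci : c < i + 1 := lt_of_mul_lt_mul_left h2 (le_of_lt hm)
    omega
  have h2 : (List.filter (fun x => decide (PySem.Int.mod (x + 1) m ≠ 0)) [i * m + m - 1]) = [] := by
    simp only [List.filter_cons, List.filter_nil]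
    rw [if_neg]
    simp only [decide_eq_true_eq, not_not]
    rw [show i * m + m - 1 + 1 = (i + 1) * m by ring, PySem.Int.mod_eq_zero_iff_dvd]
    exact Dvd.intro_left _ rfl
  rw [h1, h2, List.append_nil]

theorem gsi_flat (m : Int) (hm : 0 < m) :
    ∀ (n : Int), 0 ≤ n →
      (PySem.List.pyRange 0 (n * m) 1).filter
          (fun x => decide (PySem.Int.mod (x + 1) m ≠ 0))
        = (PySem.List.pyRange 0 n 1).flatMap
            (fun i => PySem.List.pyRange (i * m) (i * m + m - 1) 1) := by
  intro n hn
  induction n, hn using Int.le_induction with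
  | base =>
    have h1 : PySem.List.pyRange 0 ((0:Int) * m) 1 = [] := by
      rw [zero_mul]; exact PySem.List.pyRange_one_eq_nil le_rfl
    have h2 : PySem.List.pyRange (0:Int) 0 1 = [] := PySem.List.pyRange_one_eq_nil le_rfl
    rw [h1, h2]; simp
  | succ n hn ih =>
    have hnm : (0:Int) ≤ n * m := mul_nonneg hn (le_of_lt hm)
    have hsplit : PySem.List.pyRange 0 ((n + 1) * m) 1
        = PySem.List.pyRange 0 (n * m) 1 ++ PySem.List.pyRange (n * m) (n * m + m) 1 := by
      rw [show (n + 1) * m = n * m + m by ring]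
      exact PySem.List.pyRange_one_append 0 (n * m) (n * m + m) hnm (by omega)
    rw [hsplit, List.filter_append, ih, PySem.List.pyRange_one_succ_right hn,
      List.flatMap_append]
    simp only [List.flatMap_cons, List.flatMap_nil, List.append_nil]
    rw [gsi_block m n hm]

-- ===== VERDICT (by name: the statement is the Claim_ definition above) =====
theorem get_shift_index_spec : Claim_equal_get_shift_index := by
  intro n m _ hpre
  unfold Spec_get_shift_index get_shift_index get_shift_index_alt
  by_cases hm : 0 < m
  · by_cases hn : 0 ≤ n
    · rw [gsi_outer n m (n - 0).toNat 0 ([], []) rfl, gsi_flat m hm n hn]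
      simp
    · have hA : PySem.List.pyRange (0:Int) n 1 = [] := PySem.List.pyRange_one_eq_nil (by omega)
      have hB : PySem.List.pyRange (0:Int) (n * m) 1 = [] :=
        PySem.List.pyRange_one_eq_nil (le_of_lt (mul_neg_of_neg_of_pos (by omega) hm))
      rw [hA, hB]; simp
  · -- max_unit_size ≤ 0: A's inner range is empty so its outer loop changes nothing,
    -- and B's flat range is empty since Pre_ rules out n < 0 together with m < 0.
    have hnm : n * m ≤ 0 := by
      by_cases hn : 0 ≤ n
      · exact mul_nonpos_of_nonneg_of_nonpos hn (by omega)
      · have hm0 : m = 0 := by rcases hpre with h | h <;> omega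
        rw [hm0, mul_zero]
    have hB : PySem.List.pyRange (0:Int) (n * m) 1 = [] := PySem.List.pyRange_one_eq_nil hnm
    rw [gsi_outer n m (n - 0).toNat 0 ([], []) rfl, hB]
    have hblk : ∀ i : Int, PySem.List.pyRange (i * m) (i * m + m - 1) 1 = [] := fun i =>
      PySem.List.pyRange_one_eq_nil (by omega)
    simp [hblk]
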